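-- pv_equiv track=rewrite | github.com/wrmoulton/Buyer-Beware | V2/src/rationales_parser.py | extract_rationale_spans
-- ===== SOURCE A (Python) =====
-- from typing import List
--
-- def extract_rationale_spans(tokens: List[str], rationales: List[List[int]]) -> List[str]:
--     """Returns phrases where at least one annotator marked a token as rationale."""
--     final_mask = [max(r[i] for r in rationales) for i in range(len(tokens))]
--
--     spans = []
--     current_span = []
--
--     for token, keep in zip(tokens, final_mask):
--         if keep:
--             current_span.append(token)
--         elif current_span:
--             spans.append(" ".join(current_span))
--             current_span = []
--
--     if current_span:
--         spans.append(" ".join(current_span))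
--
--     return spans
-- ===== SOURCE B (Python) =====
-- from typing import List
--
-- def extract_rationale_spans(tokens: List[str], rationales: List[List[int]]) -> List[str]:
--     """Returns phrases where at least one annotator marked a token as rationale."""
--     n = len(tokens)
--     spans = []
--     i = 0
--     while i < n:
--         if max(r[i] for r in rationales):
--             j = i + 1
--             while j < n and max(r[j] for r in rationales):
--                 j += 1
--             spans.append(" ".join(tokens[i:j]))
--             i = j
--         else:
--             i += 1
--     return spans
-- ===== Notes on version B (the rewrite author's own statement) =====
-- stated objective: alternative
-- what changed: Replaces A's two-pass design (precompute a full per-token max mask, then fold with a current-span accumulator) by a single fused index scan that computes each token's keep value inline and emits each maximal kept run directly as a slice join, with no mask list and no accumulator list.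
import Mathlib
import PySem

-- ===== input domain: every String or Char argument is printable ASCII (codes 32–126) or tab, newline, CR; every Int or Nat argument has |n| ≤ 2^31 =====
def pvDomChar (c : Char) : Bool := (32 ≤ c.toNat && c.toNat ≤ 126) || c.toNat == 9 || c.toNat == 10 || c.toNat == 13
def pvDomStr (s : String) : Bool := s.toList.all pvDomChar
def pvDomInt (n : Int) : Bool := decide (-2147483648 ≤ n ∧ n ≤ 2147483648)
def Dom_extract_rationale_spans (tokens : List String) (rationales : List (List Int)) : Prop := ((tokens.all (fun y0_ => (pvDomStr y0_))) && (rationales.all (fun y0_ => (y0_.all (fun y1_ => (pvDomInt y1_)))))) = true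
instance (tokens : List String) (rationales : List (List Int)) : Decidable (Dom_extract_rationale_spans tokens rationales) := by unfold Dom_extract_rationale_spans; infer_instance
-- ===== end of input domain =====

-- B changes the decomposition only (one fused scan emitting runs, instead of A's mask pass
-- plus accumulator fold); same asymptotic cost, identical return value on Pre_.

-- shared helper: the Python expression `max(r[i] for r in rationales)` that both sources contain
-- (default 0 is never used inside Pre_)
def pvMaskVal (rationales : List (List Int)) (i : Nat) : Int :=
  (PySem.List.max? (rationales.map (fun r => PySem.List.pyGetD r (i : Int) 0)) (fun x => x)).getD 0

-- ===== PORT A =====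
def extract_rationale_spans (tokens : List String) (rationales : List (List Int)) : List String :=
  let final_mask := (List.range tokens.length).map (fun i => pvMaskVal rationales i)
  let p := (tokens.zip final_mask).foldl
    (fun (st : List String × List String) tk =>
      if tk.2 ≠ 0 then (st.1, st.2 ++ [tk.1])
      else if st.2 ≠ [] then (st.1 ++ [PySem.Str.join " " st.2], [])
      else st) ([], [])
  if p.2 ≠ [] then p.1 ++ [PySem.Str.join " " p.2] else p.1

-- ===== PORT B =====
-- inner `while j < n and max(...)` loop (structural recursion on the fuel `tokens.length - j`,
-- the obvious decreasing counter of the while loop)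
def pvScanEnd (tokens : List String) (rationales : List (List Int)) : Nat → Nat → Nat
  | 0, j => j
  | d + 1, j =>
    if j < tokens.length then
      if pvMaskVal rationales j ≠ 0 then pvScanEnd tokens rationales d (j + 1) else j
    else j

-- outer `while i < n` loop (fuel `tokens.length - i`, which each iteration strictly decreases)
def pvAltGo (tokens : List String) (rationales : List (List Int)) : Nat → Nat → List String
  | 0, _ => []
  | d + 1, i =>
    if i < tokens.length then
      if pvMaskVal rationales i ≠ 0 then
        let j := pvScanEnd tokens rationales (tokens.length - (i + 1)) (i + 1)
        PySem.Str.join " " (PySem.List.slice tokens (some (i : Int)) (some (j : Int)))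
          :: pvAltGo tokens rationales d j
      else pvAltGo tokens rationales d (i + 1)
    else []

def extract_rationale_spans_alt (tokens : List String) (rationales : List (List Int)) : List String :=
  pvAltGo tokens rationales tokens.length 0

-- ===== PRECONDITION & SPEC =====
-- Pre_ excludes exactly the inputs where the Python raises: max() of an empty sequence
-- (ValueError: tokens nonempty but rationales empty) or r[i] out of range for some
-- annotator row shorter than tokens (IndexError).
def Pre_extract_rationale_spans (tokens : List String) (rationales : List (List Int)) : Prop :=
  (tokens = [] ∨ rationales ≠ []) ∧ ∀ r ∈ rationales, tokens.length ≤ r.length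
instance (tokens : List String) (rationales : List (List Int)) : Decidable (Pre_extract_rationale_spans tokens rationales) := by unfold Pre_extract_rationale_spans; infer_instance
def pvWitness_extract_rationale_spans : List String × List (List Int) :=
  (["a", "b", "c"], [[1, 0, 1], [0, 0, 1]])

def Spec_extract_rationale_spans (tokens : List String) (rationales : List (List Int)) (out : List String) : Prop := out = extract_rationale_spans_alt tokens rationales
instance (tokens : List String) (rationales : List (List Int)) (out : List String) : Decidable (Spec_extract_rationale_spans tokens rationales out) := by unfold Spec_extract_rationale_spans; infer_instance

-- ===== CLAIM (what is proved, stated in full; the proofs are below) =====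
def Claim_equal_extract_rationale_spans : Prop := ∀ (tokens : List String) (rationales : List (List Int)), Dom_extract_rationale_spans tokens rationales → Pre_extract_rationale_spans tokens rationales → Spec_extract_rationale_spans tokens rationales (extract_rationale_spans tokens rationales)

-- ===== LEMMAS AND PROOFS =====

-- specification of A's fold+flush, by structural recursion on the remaining (token, keep) pairs
def pvFin (cur : List String) : List (String × Int) → List String
  | [] => if cur ≠ [] then [PySem.Str.join " " cur] else []
  | (t, k) :: rest =>
      if k ≠ 0 then pvFin (cur ++ [t]) rest
      else if cur ≠ [] then PySem.Str.join " " cur :: pvFin [] rest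
      else pvFin [] rest

theorem pvFoldl_eq_fin (l : List (String × Int)) : ∀ (spans cur : List String),
    (let p := l.foldl
      (fun (st : List String × List String) tk =>
        if tk.2 ≠ 0 then (st.1, st.2 ++ [tk.1])
        else if st.2 ≠ [] then (st.1 ++ [PySem.Str.join " " st.2], [])
        else st) (spans, cur);
     if p.2 ≠ [] then p.1 ++ [PySem.Str.join " " p.2] else p.1) = spans ++ pvFin cur l := by
  induction l with
  | nil => intro spans cur; simp only [List.foldl_nil, pvFin]; split <;> simp
  | cons hd tl ih =>
      intro spans cur
      obtain ⟨t, k⟩ := hd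
      simp only [List.foldl_cons, pvFin]
      by_cases hk : k ≠ 0
      · simp only [if_pos hk]; exact ih spans (cur ++ [t])
      · simp only [if_neg hk]
        by_cases hc : cur ≠ []
        · simp only [if_pos hc, ih]; simp
        · simp only [if_neg hc]
          have : cur = [] := by simpa using hc
          subst this; exact ih spans []

-- the suffix of A's zipped list starting at index k
def pvL (tokens : List String) (rationales : List (List Int)) (k : Nat) : List (String × Int) :=
  (tokens.drop k).zip ((List.range' k (tokens.length - k)).map (pvMaskVal rationales))

theorem pvL_cons (tokens : List String) (rationales : List (List Int)) (k : Nat)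
    (hk : k < tokens.length) :
    pvL tokens rationales k = (tokens[k], pvMaskVal rationales k) :: pvL tokens rationales (k + 1) := by
  unfold pvL
  have h1 : tokens.length - k = (tokens.length - (k + 1)) + 1 := by omega
  rw [h1, List.range'_succ, List.map_cons, List.drop_eq_getElem_cons hk, List.zip_cons_cons]

theorem pvL_nil (tokens : List String) (rationales : List (List Int)) :
    pvL tokens rationales tokens.length = [] := by
  simp [pvL]

theorem pvScanEnd_ge (tokens : List String) (rationales : List (List Int)) (d : Nat) :
    ∀ j, j ≤ pvScanEnd tokens rationales d j := by
  induction d with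
  | zero => intro j; simp [pvScanEnd]
  | succ d ih =>
      intro j
      simp only [pvScanEnd]
      split_ifs with h1 h2
      · have := ih (j + 1); omega
      · omega
      · omega

theorem pvScanEnd_le (tokens : List String) (rationales : List (List Int)) (d : Nat) :
    ∀ j, j ≤ tokens.length → pvScanEnd tokens rationales d j ≤ tokens.length := by
  induction d with
  | zero => intro j hj; simpa [pvScanEnd] using hj
  | succ d ih =>
      intro j hj
      simp only [pvScanEnd]
      split_ifs with h1 h2
      · exact ih (j + 1) (by omega)
      · omega
      · omega

theorem pvScanEnd_keep (tokens : List String) (rationales : List (List Int)) (d : Nat) :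
    ∀ j x, j ≤ x → x < pvScanEnd tokens rationales d j → pvMaskVal rationales x ≠ 0 := by
  induction d with
  | zero => intro j x hx1 hx2; simp [pvScanEnd] at hx2; omega
  | succ d ih =>
      intro j x hx1 hx2
      simp only [pvScanEnd] at hx2
      split_ifs at hx2 with h1 h2
      · by_cases hxj : x = j
        · subst hxj; exact h2
        · exact ih (j + 1) x (by omega) hx2
      · omega
      · omega

theorem pvScanEnd_stop (tokens : List String) (rationales : List (List Int)) (d : Nat) :
    ∀ j, j ≤ tokens.length → tokens.length ≤ j + d →
    pvScanEnd tokens rationales d j = tokens.length ∨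
      (pvScanEnd tokens rationales d j < tokens.length ∧
        pvMaskVal rationales (pvScanEnd tokens rationales d j) = 0) := by
  induction d with
  | zero => intro j hj1 hj2; left; simp [pvScanEnd]; omega
  | succ d ih =>
      intro j hj1 hj2
      simp only [pvScanEnd]
      split_ifs with h1 h2
      · exact ih (j + 1) (by omega) (by omega)
      · right
        refine ⟨h1, ?_⟩
        by_contra hc; exact h2 hc
      · left; omega

-- the chunk lemma: a run of kept tokens just extends the current span
theorem pvFin_chunk (tokens : List String) (rationales : List (List Int)) :
    ∀ (d k : Nat) (cur : List String), k + d ≤ tokens.length →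
    (∀ x, k ≤ x → x < k + d → pvMaskVal rationales x ≠ 0) →
    pvFin cur (pvL tokens rationales k) =
      pvFin (cur ++ (tokens.drop k).take d) (pvL tokens rationales (k + d)) := by
  intro d
  induction d with
  | zero => intro k cur _ _; simp
  | succ d ih =>
      intro k cur hle hkeep
      have hk : k < tokens.length := by omega
      rw [pvL_cons tokens rationales k hk]
      simp only [pvFin, if_pos (hkeep k (le_refl k) (by omega))]
      have := ih (k + 1) (cur ++ [tokens[k]]) (by omega)
        (fun x hx1 hx2 => hkeep x (by omega) (by omega))
      rw [this]
      have hdrop : (tokens.drop k).take (d + 1) = tokens[k] :: (tokens.drop (k + 1)).take d := by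
        rw [List.drop_eq_getElem_cons hk, List.take_succ_cons]
      rw [hdrop]
      have : k + (d + 1) = k + 1 + d := by omega
      rw [this]
      simp

theorem pvSlice_eq (tokens : List String) (k j : Nat) :
    PySem.List.slice tokens (some (k : Int)) (some (j : Int)) = (tokens.drop k).take (j - k) :=
  PySem.List.slice_natCast tokens k j

theorem pvFin_eq_altGo (tokens : List String) (rationales : List (List Int)) :
    ∀ (d k : Nat), tokens.length ≤ k + d →
    pvFin [] (pvL tokens rationales k) = pvAltGo tokens rationales d k := by
  intro d
  induction d with
  | zero =>
      intro k hkd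
      have hnil : tokens.drop k = [] := List.drop_eq_nil_of_le (by omega)
      simp [pvAltGo, pvL, hnil, pvFin]
  | succ d ih =>
      intro k hkd
      simp only [pvAltGo]
      by_cases hk : k < tokens.length
      · simp only [if_pos hk]
        by_cases hm : pvMaskVal rationales k ≠ 0
        · simp only [if_pos hm]
          obtain ⟨j, hj⟩ : ∃ j, j = pvScanEnd tokens rationales (tokens.length - (k + 1)) (k + 1) :=
            ⟨_, rfl⟩
          rw [← hj]
          have hj1 : k + 1 ≤ j := hj ▸ pvScanEnd_ge tokens rationales _ (k + 1)
          have hj2 : j ≤ tokens.length := hj ▸ pvScanEnd_le tokens rationales _ (k + 1) (by omega)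
          have hkeep : ∀ x, k ≤ x → x < j → pvMaskVal rationales x ≠ 0 := by
            intro x hx1 hx2
            by_cases hxk : x = k
            · subst hxk; exact hm
            · exact pvScanEnd_keep tokens rationales _ (k + 1) x (by omega) (hj ▸ hx2)
          have hchunk := pvFin_chunk tokens rationales (j - k) k [] (by omega)
            (fun x h1 h2 => hkeep x h1 (by omega))
          have hkj : k + (j - k) = j := by omega
          rw [hkj] at hchunk
          rw [hchunk, List.nil_append, pvSlice_eq]
          have hcurlen : ((tokens.drop k).take (j - k)).length = j - k := by
            simp; omega
          have hcurne : (tokens.drop k).take (j - k) ≠ [] := by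
            intro hc; rw [hc] at hcurlen; simp at hcurlen; omega
          have hstop := pvScanEnd_stop tokens rationales (tokens.length - (k + 1)) (k + 1)
            (by omega) (by omega)
          rw [← hj] at hstop
          have hih := ih j (by omega)
          rcases hstop with hstop | ⟨hlt, hzero⟩
          · rw [← hih, hstop, pvL_nil]
            rw [hstop] at hcurne
            simp [pvFin, hcurne]
          · rw [← hih, pvL_cons tokens rationales j hlt]
            simp [pvFin, hzero, hcurne]
        · simp only [if_neg hm]
          rw [pvL_cons tokens rationales k hk]
          simp only [pvFin, if_neg hm]
          exact ih (k + 1) (by omega)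
      · have hnil : tokens.drop k = [] := List.drop_eq_nil_of_le (by omega)
        simp [if_neg hk, pvL, hnil, pvFin]

theorem pvA_eq_fin (tokens : List String) (rationales : List (List Int)) :
    extract_rationale_spans tokens rationales = pvFin [] (pvL tokens rationales 0) := by
  unfold extract_rationale_spans
  have hz : tokens.zip ((List.range tokens.length).map (pvMaskVal rationales)) =
      pvL tokens rationales 0 := by
    unfold pvL
    rw [List.range_eq_range']
    simp
  simp only [hz]
  exact pvFoldl_eq_fin (pvL tokens rationales 0) [] []

-- ===== VERDICT (by name: the statement is the Claim_ definition above) =====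
theorem extract_rationale_spans_spec : Claim_equal_extract_rationale_spans := by
  intro tokens rationales _ _
  unfold Spec_extract_rationale_spans extract_rationale_spans_alt
  rw [pvA_eq_fin]
  exact pvFin_eq_altGo tokens rationales tokens.length 0 (by omega)
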